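-- pv_equiv track=rewrite | github.com/thealper2/codewars-solutions | 7-kyu/simple_fun_34_numbers_grouping.py | numbers_grouping
-- ===== SOURCE A (Python) =====
-- def numbers_grouping(arr):
--     group_counts = {}
--     for num in arr:
--         group = (num - 1) // 10**4 + 1
--         if group in group_counts:
--             group_counts[group] += 1
--         else:
--             group_counts[group] = 1
--
--     total_lines = len(group_counts) + sum(group_counts.values())
--     return total_lines
-- ===== SOURCE B (Python) =====
-- def numbers_grouping(arr):
--     keys = sorted((num - 1) // 10**4 + 1 for num in arr)
--     groups = 0
--     prev = None
--     for k in keys: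
--         if prev is None or k != prev:
--             groups += 1
--         prev = k
--     return groups + len(arr)
-- ===== Notes on version B (the rewrite author's own statement) =====
-- stated objective: alternative
-- what changed: Replaces A's counting dict and membership branch by sort-then-scan: B sorts the bucket keys, counts groups as adjacent transitions in the sorted list, and adds len(arr) instead of summing per-group counts.
import Mathlib
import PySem

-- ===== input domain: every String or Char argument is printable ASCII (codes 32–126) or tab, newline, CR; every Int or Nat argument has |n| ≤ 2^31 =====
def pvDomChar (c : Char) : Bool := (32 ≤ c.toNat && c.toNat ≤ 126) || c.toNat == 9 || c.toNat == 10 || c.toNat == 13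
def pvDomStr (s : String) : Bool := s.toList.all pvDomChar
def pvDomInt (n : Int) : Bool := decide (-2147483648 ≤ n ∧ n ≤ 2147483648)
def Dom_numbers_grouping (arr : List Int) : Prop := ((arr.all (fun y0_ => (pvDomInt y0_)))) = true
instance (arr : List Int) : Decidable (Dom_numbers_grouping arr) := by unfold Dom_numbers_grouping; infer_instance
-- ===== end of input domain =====

-- B replaces A's counting dict by sort-then-scan: it sorts the bucket keys, counts groups as
-- adjacent transitions in the sorted list and adds len(arr); alternative algorithm, not faster.

-- ===== PORT A =====
def numbers_grouping (arr : List Int) : Int :=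
  let group_counts : PySem.Dict Int Int :=
    arr.foldl (fun d num =>
      let group := PySem.Int.floordiv (num - 1) (10 ^ 4) + 1
      if d.contains group then d.insert group (d.getD group 0 + 1)
      else d.insert group 1) PySem.Dict.empty
  (group_counts.size : Int) + group_counts.values.sum

-- ===== PORT B =====
-- loop body of Source B's scan: state = (groups, prev); 'if prev is None or k != prev: groups += 1'
def pvScan (st : Int × Option Int) (k : Int) : Int × Option Int :=
  ((if st.2 = none ∨ st.2 ≠ some k then st.1 + 1 else st.1), some k)

def numbers_grouping_alt (arr : List Int) : Int :=
  let keys := PySem.List.sorted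
    (arr.map (fun num => PySem.Int.floordiv (num - 1) (10 ^ 4) + 1)) (fun x => x) false
  (keys.foldl pvScan (0, none)).1 + (arr.length : Int)

-- ===== PRECONDITION & SPEC =====
def Spec_numbers_grouping (arr : List Int) (out : Int) : Prop := out = numbers_grouping_alt arr
instance (arr : List Int) (out : Int) : Decidable (Spec_numbers_grouping arr out) := by unfold Spec_numbers_grouping; infer_instance

-- ===== CLAIM (what is proved, stated in full; the proofs are below) =====
def Claim_equal_numbers_grouping : Prop := ∀ (arr : List Int), Dom_numbers_grouping arr → Spec_numbers_grouping arr (numbers_grouping arr)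

-- ===== LEMMAS AND PROOFS =====

-- A's loop body is the standard counter step: in the else branch getD yields 0.
theorem counter_step (d : PySem.Dict Int Int) (g : Int) :
    (if d.contains g then d.insert g (d.getD g 0 + 1) else d.insert g 1)
    = d.insert g (d.getD g 0 + 1) := by
  by_cases h : d.contains g
  · simp [h]
  · simp only [Bool.not_eq_true] at h
    rw [if_neg (by simp [h]), PySem.Dict.getD_of_not_contains (h := h)]
    norm_num

-- summing the counts of a nodup list with the same members as l gives l.length
theorem sum_counts_of_nodup (l u : List Int) (hnd : u.Nodup)
    (hmem : ∀ x, x ∈ u ↔ x ∈ l) :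
    (u.map (fun k => l.count k)).sum = l.length := by
  have hperm : u.Perm l.dedup := by
    rw [List.perm_ext_iff_of_nodup hnd l.nodup_dedup]
    intro a; rw [hmem, List.mem_dedup]
  calc (u.map (fun k => l.count k)).sum
      = (l.dedup.map (fun k => l.count k)).sum := (hperm.map _).sum_eq
    _ = l.length := l.sum_map_count_dedup_eq_length

-- scan with prev = some a over a sorted tail dominated by a counts the distinct values ≠ a
theorem scan_some (l : List Int) : ∀ (g a : Int), l.Pairwise (· ≤ ·) → (∀ x ∈ l, a ≤ x) →
    (l.foldl pvScan (g, some a)).1 = g + ((l.toFinset.erase a).card : Int) := by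
  induction l with
  | nil => intro g a _ _; simp
  | cons k ks ih =>
    intro g a hpw hle
    have hks : ks.Pairwise (· ≤ ·) := (List.pairwise_cons.mp hpw).2
    have hkle : ∀ x ∈ ks, k ≤ x := (List.pairwise_cons.mp hpw).1
    by_cases hak : a = k
    · have hstep : pvScan (g, some a) k = (g, some k) := by
        simp [pvScan, hak]
      rw [List.foldl_cons, hstep, ih g k hks hkle]
      subst hak
      congr 2
      simp [List.toFinset_cons, Finset.erase_insert_eq_erase]
    · have hstep : pvScan (g, some a) k = (g + 1, some k) := by
        simp [pvScan, hak]
      rw [List.foldl_cons, hstep, ih (g + 1) k hks hkle]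
      have halt : a < k := lt_of_le_of_ne (hle k (List.mem_cons_self)) hak
      have hanotin : a ∉ (k :: ks).toFinset := by
        simp only [List.toFinset_cons, Finset.mem_insert, List.mem_toFinset]
        rintro (h | h)
        · exact hak h
        · exact absurd (hkle a h) (not_le.mpr halt)
      rw [Finset.erase_eq_of_notMem hanotin]
      have hins : (k :: ks).toFinset = insert k (ks.toFinset.erase k) := by
        ext x; simp [List.toFinset_cons, Finset.mem_erase]; tauto
      rw [hins, Finset.card_insert_of_notMem (Finset.notMem_erase k _)]
      push_cast; ring

-- the whole scan over a sorted key list counts the distinct keys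
theorem scan_none (l : List Int) (hpw : l.Pairwise (· ≤ ·)) :
    (l.foldl pvScan (0, none)).1 = (l.toFinset.card : Int) := by
  cases l with
  | nil => simp
  | cons k ks =>
    have hks : ks.Pairwise (· ≤ ·) := (List.pairwise_cons.mp hpw).2
    have hkle : ∀ x ∈ ks, k ≤ x := (List.pairwise_cons.mp hpw).1
    have hstep : pvScan (0, none) k = (1, some k) := by simp [pvScan]
    rw [List.foldl_cons, hstep, scan_some ks 1 k hks hkle]
    have hins : (k :: ks).toFinset = insert k (ks.toFinset.erase k) := by
      ext x; simp [List.toFinset_cons, Finset.mem_erase]; tauto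
    rw [hins, Finset.card_insert_of_notMem (Finset.notMem_erase k _)]
    push_cast; ring

-- ===== VERDICT (by name: the statement is the Claim_ definition above) =====
theorem numbers_grouping_spec : Claim_equal_numbers_grouping := by
  intro arr _
  unfold Spec_numbers_grouping numbers_grouping numbers_grouping_alt
  set key : Int → Int := fun num => PySem.Int.floordiv (num - 1) (10 ^ 4) + 1 with hkey
  -- A's loop builds the counter of the mapped keys
  have hfold : arr.foldl (fun d num =>
      let group := PySem.Int.floordiv (num - 1) (10 ^ 4) + 1
      if d.contains group then d.insert group (d.getD group 0 + 1)
      else d.insert group 1) (PySem.Dict.empty : PySem.Dict Int Int)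
      = PySem.Dict.counter (arr.map key) := by
    have h1 : arr.foldl (fun d num =>
        let group := PySem.Int.floordiv (num - 1) (10 ^ 4) + 1
        if d.contains group then d.insert group (d.getD group 0 + 1)
        else d.insert group 1) (PySem.Dict.empty : PySem.Dict Int Int)
        = arr.foldl (fun d num => d.insert (key num) (d.getD (key num) 0 + 1))
            (PySem.Dict.empty : PySem.Dict Int Int) :=
      PySem.List.foldl_congr_mem _ _ _ _ (fun d x _ => counter_step d (key x))
    rw [h1, ← PySem.Dict.foldl_insert_getD_add_one_eq_counter, List.foldl_map]
  show ((arr.foldl _ (PySem.Dict.empty : PySem.Dict Int Int)).size : Int)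
      + (arr.foldl _ (PySem.Dict.empty : PySem.Dict Int Int)).values.sum
      = ((PySem.List.sorted (arr.map key) (fun x => x) false).foldl pvScan (0, none)).1
        + (arr.length : Int)
  rw [hfold]
  -- A's value: dict size = number of distinct keys, sum of counts = number of keys
  have hitems := PySem.Dict.items_counter (xs := arr.map key)
  have hsize : (PySem.Dict.counter (arr.map key)).size
      = (PySem.Set.ofList (arr.map key)).length := by
    simp [PySem.Dict.size, hitems]
  have hv : (PySem.Dict.counter (arr.map key)).values
      = ((PySem.Set.ofList (arr.map key)).map (fun k => (arr.map key).count k)).map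
          (Nat.cast : Nat → Int) := by
    simp [PySem.Dict.values, hitems, List.map_map, Function.comp]
  have hvals : (PySem.Dict.counter (arr.map key)).values.sum
      = ((arr.map key).length : Int) := by
    rw [hv, ← Nat.cast_list_sum,
        sum_counts_of_nodup (arr.map key) (PySem.Set.ofList (arr.map key))
          (PySem.Set.nodup_ofList _) (fun x => PySem.Set.mem_ofList _ x)]
  -- B's value: the scan over the sorted keys counts the distinct keys
  have hperm : (PySem.List.sorted (arr.map key) (fun x => x) false).Perm (arr.map key) :=
    PySem.List.sorted_perm _ _ _
  have hpw : (PySem.List.sorted (arr.map key) (fun x => x) false).Pairwise (· ≤ ·) :=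
    PySem.List.sorted_pairwise _ _
  have hscan := scan_none _ hpw
  rw [hsize, hvals, hscan, List.toFinset_eq_of_perm _ _ hperm]
  -- distinct count: Set.ofList length = toFinset card
  have hsetcard : (PySem.Set.ofList (arr.map key)).length = (arr.map key).toFinset.card := by
    have hp : (PySem.Set.ofList (arr.map key)).Perm (arr.map key).dedup := by
      rw [List.perm_ext_iff_of_nodup (PySem.Set.nodup_ofList _) (arr.map key).nodup_dedup]
      intro a; rw [PySem.Set.mem_ofList, List.mem_dedup]
    rw [hp.length_eq, List.card_toFinset]
  rw [hsetcard]
  simp
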